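-- pv_equiv track=rewrite | github.com/Muzzh/Codefights | TheCore/LoopTunnel/LeastFactorial.py | leastFactorial
-- ===== SOURCE A (Python) =====
-- def leastFactorial(n):
--     for i in range(1, 6):
--         temp = i
--         k = 1
--         while temp >= 1:
--             k = k*temp
--             temp -= 1
--         if k >= n:
--             return k
-- ===== SOURCE B (Python) =====
-- def leastFactorial(n):
--     fact = 1
--     for i in range(1, 6):
--         fact *= i
--         if fact >= n:
--             return fact
-- ===== Notes on version B (the rewrite author's own statement) =====
-- stated objective: simpler
-- what changed: Replaces the inner while-loop that recomputes i! from scratch on every outer iteration with a single pass maintaining a running factorial accumulator.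
import Mathlib
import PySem

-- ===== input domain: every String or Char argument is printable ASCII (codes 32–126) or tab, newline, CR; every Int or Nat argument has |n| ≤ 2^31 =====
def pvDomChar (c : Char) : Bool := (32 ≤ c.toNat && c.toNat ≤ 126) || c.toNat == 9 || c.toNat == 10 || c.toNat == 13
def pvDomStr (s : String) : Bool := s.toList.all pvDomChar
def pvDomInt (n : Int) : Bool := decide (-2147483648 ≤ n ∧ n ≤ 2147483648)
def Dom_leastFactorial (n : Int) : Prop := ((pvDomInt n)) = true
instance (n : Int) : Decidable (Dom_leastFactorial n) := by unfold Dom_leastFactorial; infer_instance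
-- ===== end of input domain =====

-- B replaces A's per-candidate inner while-loop (recomputing i! from scratch) with one
-- pass keeping a running factorial accumulator; objective: simpler.

-- ===== PORT A =====
-- inner while-loop: while temp >= 1: k = k*temp; temp -= 1
def pvWhileA (k temp : Int) : Int :=
  if temp ≥ 1 then pvWhileA (k * temp) (temp - 1) else k
termination_by temp.toNat
decreasing_by omega

-- for i in range(1,6): k = i! (via the while loop); if k >= n: return k
def pvLoopA (n : Int) : List Int → Option Int
  | [] => none
  | i :: rest =>
    let k := pvWhileA 1 i
    if k ≥ n then some k else pvLoopA n rest

def leastFactorial (n : Int) : Option Int :=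
  pvLoopA n (PySem.List.pyRange 1 6 1)

-- ===== PORT B =====
def pvLoopB (n fact : Int) : List Int → Option Int
  | [] => none
  | i :: rest =>
    let f := fact * i
    if f ≥ n then some f else pvLoopB n f rest

def leastFactorial_alt (n : Int) : Option Int :=
  pvLoopB n 1 (PySem.List.pyRange 1 6 1)

-- ===== PRECONDITION & SPEC =====
def Spec_leastFactorial (n : Int) (out : Option Int) : Prop := out = leastFactorial_alt n
instance (n : Int) (out : Option Int) : Decidable (Spec_leastFactorial n out) := by unfold Spec_leastFactorial; infer_instance

-- ===== CLAIM (what is proved, stated in full; the proofs are below) =====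
def Claim_equal_leastFactorial : Prop := ∀ (n : Int), Dom_leastFactorial n → Spec_leastFactorial n (leastFactorial n)

-- ===== LEMMAS AND PROOFS =====
theorem pvRange16 : PySem.List.pyRange 1 6 1 = [1, 2, 3, 4, 5] := by decide

theorem whileA_1 : pvWhileA 1 1 = 1 := by rw [pvWhileA]; norm_num; rw [pvWhileA]; norm_num
theorem whileA_2 : pvWhileA 1 2 = 2 := by
  rw [pvWhileA]; norm_num; rw [pvWhileA]; norm_num; rw [pvWhileA]; norm_num
theorem whileA_3 : pvWhileA 1 3 = 6 := by
  rw [pvWhileA]; norm_num; rw [pvWhileA]; norm_num; rw [pvWhileA]; norm_num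
  rw [pvWhileA]; norm_num
theorem whileA_4 : pvWhileA 1 4 = 24 := by
  rw [pvWhileA]; norm_num; rw [pvWhileA]; norm_num; rw [pvWhileA]; norm_num
  rw [pvWhileA]; norm_num; rw [pvWhileA]; norm_num
theorem whileA_5 : pvWhileA 1 5 = 120 := by
  rw [pvWhileA]; norm_num; rw [pvWhileA]; norm_num; rw [pvWhileA]; norm_num
  rw [pvWhileA]; norm_num; rw [pvWhileA]; norm_num; rw [pvWhileA]; norm_num

-- ===== VERDICT (by name: the statement is the Claim_ definition above) =====
theorem leastFactorial_spec : Claim_equal_leastFactorial := by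
  intro n _
  unfold Spec_leastFactorial leastFactorial leastFactorial_alt
  rw [pvRange16]
  simp only [pvLoopA, pvLoopB, whileA_1, whileA_2, whileA_3, whileA_4, whileA_5]
  norm_num
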